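-- pv_equiv track=rewrite | github.com/martinroddam/dataform-sqlx-linter | src/dataform_sqlx_linter/utils/io.py | normalize_changed_files
-- ===== SOURCE A (Python) =====
-- from typing import Any, Dict, Iterable, Iterator, List
--
-- def normalize_changed_files(files: Iterable[str]) -> List[str]:
--     """
--     Trim, dedupe, and preserve order. (GitHub passes comma-joined lists.)
--     """
--     seen = set()
--     out: List[str] = []
--     for raw in files:
--         if not raw:
--             continue
--         for part in str(raw).split(","):
--             f = part.strip()
--             if f and f not in seen:
--                 seen.add(f)
--                 out.append(f)
--     return out
-- ===== SOURCE B (Python) =====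
-- def normalize_changed_files(files):
--     """
--     Trim, dedupe, and preserve order. (GitHub passes comma-joined lists.)
--     Flatten the stripped non-empty comma-parts first, then dedupe by repeatedly
--     taking the head and purging its copies from the remainder (no seen-set).
--     """
--     rest = [f for raw in files if raw
--               for f in (p.strip() for p in str(raw).split(",")) if f]
--     out = []
--     while rest:
--         h = rest[0]
--         out.append(h)
--         rest = [x for x in rest[1:] if x != h]
--     return out
-- ===== Notes on version B (the rewrite author's own statement) =====
-- stated objective: alternative
-- what changed: B drops A's seen-set entirely: it flattens all stripped non-empty comma-parts first, then dedupes with a head-and-purge loop that repeatedly emits the first remaining part and filters every copy of it out of the remainder.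
import Mathlib
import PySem

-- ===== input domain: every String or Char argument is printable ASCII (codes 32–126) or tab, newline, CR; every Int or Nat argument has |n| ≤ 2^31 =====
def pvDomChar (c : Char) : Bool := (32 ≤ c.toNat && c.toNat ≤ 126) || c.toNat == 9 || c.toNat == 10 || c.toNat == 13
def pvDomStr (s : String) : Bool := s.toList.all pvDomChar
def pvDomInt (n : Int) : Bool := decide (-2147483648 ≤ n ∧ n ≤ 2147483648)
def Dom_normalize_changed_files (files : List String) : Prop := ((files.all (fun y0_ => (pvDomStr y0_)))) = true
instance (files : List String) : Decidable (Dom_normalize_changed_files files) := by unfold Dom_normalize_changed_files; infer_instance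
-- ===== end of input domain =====

-- B flattens all stripped non-empty comma-parts first, then dedupes with a head-and-purge loop (no seen-set): an alternative decomposition.


-- s.split(",") with the literal non-empty separator: PySem.Str.split? is always `some` here (exact)
def pvSplitComma (s : String) : List String := (PySem.Str.split? s ",").getD []

-- ===== PORT A =====
def pvInnerStep (st2 : PySem.Set String × List String) (part : String) :
    PySem.Set String × List String :=
  let f := PySem.Str.strip part
  if f != "" && !(PySem.Set.contains st2.1 f) then
    (PySem.Set.add st2.1 f, st2.2 ++ [f])
  else st2

def pvOuterStep (st : PySem.Set String × List String) (raw : String) :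
    PySem.Set String × List String :=
  if raw = "" then st else (pvSplitComma raw).foldl pvInnerStep st

def normalize_changed_files (files : List String) : List String :=
  (files.foldl pvOuterStep ((PySem.Set.empty : PySem.Set String), ([] : List String))).2

-- ===== PORT B =====
-- B's flatten comprehension: non-empty raws, their stripped comma-parts, non-empty ones kept
def pvFlatten (files : List String) : List String :=
  (files.filter (fun raw => raw != "")).flatMap
    (fun raw => ((pvSplitComma raw).map PySem.Str.strip).filter (fun f => f != ""))

-- B's while loop: emit the head, purge its copies from the remainder, repeat
def pvPeel : List String → List String
  | [] => []
  | h :: t => h :: pvPeel (t.filter (fun x => x != h))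
termination_by l => l.length
decreasing_by simpa using Nat.lt_succ_of_le (List.length_filter_le _ _)

def normalize_changed_files_alt (files : List String) : List String :=
  pvPeel (pvFlatten files)

-- ===== PRECONDITION & SPEC =====
def Spec_normalize_changed_files (files : List String) (out : List String) : Prop := out = normalize_changed_files_alt files
instance (files : List String) (out : List String) : Decidable (Spec_normalize_changed_files files out) := by unfold Spec_normalize_changed_files; infer_instance

-- ===== CLAIM (what is proved, stated in full; the proofs are below) =====
def Claim_equal_normalize_changed_files : Prop := ∀ (files : List String), Dom_normalize_changed_files files → Spec_normalize_changed_files files (normalize_changed_files files)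

-- ===== LEMMAS AND PROOFS =====

-- On a state whose seen-set and output list are the SAME list, one inner step keeps
-- them equal: both become Set.add of the stripped part (or stay put on an empty part).
lemma pvInnerStep_doubled (acc : List String) (part : String) :
    pvInnerStep (acc, acc) part =
      (if PySem.Str.strip part = "" then (acc, acc)
       else (PySem.Set.add acc (PySem.Str.strip part), PySem.Set.add acc (PySem.Str.strip part))) := by
  unfold pvInnerStep
  by_cases hf : PySem.Str.strip part = ""
  · simp [hf]
  · by_cases hm : PySem.Str.strip part ∈ acc
    · simp [hf, hm]
    · simp [hf, hm]

-- A's inner loop over the parts of one raw entry, from a doubled accumulator, acts as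
-- foldl Set.add on the stripped non-empty parts.
lemma inner_eq (parts : List String) (acc : List String) :
    parts.foldl pvInnerStep (acc, acc)
      = (let r := ((parts.map PySem.Str.strip).filter (fun p => p != "")).foldl PySem.Set.add acc
         (r, r)) := by
  induction parts generalizing acc with
  | nil => rfl
  | cons part rest ih =>
      rw [List.foldl_cons, pvInnerStep_doubled]
      by_cases hf : PySem.Str.strip part = ""
      · simpa [hf] using ih acc
      · simpa [hf] using ih (PySem.Set.add acc (PySem.Str.strip part))

-- A's whole loop, from a doubled accumulator, is foldl Set.add over the flattened
-- stripped non-empty parts of the non-empty raws (= pvFlatten).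
lemma outer_eq (files : List String) (acc : List String) :
    files.foldl pvOuterStep (acc, acc)
      = (let r := (((files.filter (fun raw => raw != "")).flatMap
            (fun raw => (pvSplitComma raw).map PySem.Str.strip)).filter
              (fun p => p != "")).foldl PySem.Set.add acc
         (r, r)) := by
  induction files generalizing acc with
  | nil => rfl
  | cons raw rest ih =>
      rw [List.foldl_cons]
      by_cases hr : raw = ""
      · simpa [pvOuterStep, hr] using ih acc
      · rw [show pvOuterStep (acc, acc) raw = (pvSplitComma raw).foldl pvInnerStep (acc, acc) from by
            simp [pvOuterStep, hr]]
        rw [inner_eq]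
        have hrb : (raw != "") = true := by simpa using hr
        simp only [List.filter_cons, hrb, if_pos, List.flatMap_cons, List.filter_append,
          List.foldl_append]
        exact ih _

-- a global filter after a flatMap equals filtering inside each block
lemma filter_flatMap_comm {α β : Type} (p : β → Bool) (f : α → List β) (l : List α) :
    (l.flatMap f).filter p = l.flatMap (fun a => (f a).filter p) := by
  induction l with
  | nil => rfl
  | cons a l ih => simp [List.flatMap_cons, List.filter_append, ih]

-- foldl Set.add commutes with a filter applied to both the accumulator and the list
lemma foldl_add_filter (p : String → Bool) (t : List String) :
    ∀ acc : List String, List.foldl PySem.Set.add (acc.filter p) (t.filter p)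
      = (List.foldl PySem.Set.add acc t).filter p := by
  induction t with
  | nil => intro acc; rfl
  | cons a t ih =>
      intro acc
      by_cases hp : p a
      · rw [show (a :: t).filter p = a :: t.filter p by simp [hp]]
        rw [List.foldl_cons, List.foldl_cons]
        rw [show PySem.Set.add (acc.filter p) a = (PySem.Set.add acc a).filter p from ?_]
        · exact ih _
        · by_cases hm : a ∈ acc
          · simp [PySem.Set.add, hm, hp]
          · simp [PySem.Set.add, hm, hp, List.filter_append]
      · rw [show (a :: t).filter p = t.filter p by simp [hp]]
        rw [List.foldl_cons]
        rw [show PySem.Set.add acc a = if a ∈ acc then acc else acc ++ [a] by simp [PySem.Set.add]]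
        by_cases hm : a ∈ acc
        · simp [hm, ih]
        · rw [if_neg hm, ← ih (acc ++ [a])]
          simp [List.filter_append, hp]

-- Set.ofList commutes with filter (instance of the previous lemma at acc = [])
lemma ofList_filter (p : String → Bool) (t : List String) :
    PySem.Set.ofList (t.filter p) = (PySem.Set.ofList t).filter p :=
  foldl_add_filter p t []

-- the head-and-purge loop computes exactly the order-preserving first-occurrence dedup
lemma peel_eq_ofList (l : List String) : pvPeel l = PySem.Set.ofList l := by
  induction hn : l.length using Nat.strong_induction_on generalizing l with
  | _ n ih =>
      match l with
      | [] => rw [pvPeel]; rfl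
      | h :: t =>
          rw [pvPeel, PySem.Set.ofList_cons,
            ih (t.filter (fun x => x != h)).length
              (by simpa [← hn] using Nat.lt_succ_of_le (List.length_filter_le _ _)) _ rfl,
            ofList_filter]
          simp [PySem.Set.discard, bne]

-- ===== VERDICT (by name: the statement is the Claim_ definition above) =====
theorem normalize_changed_files_spec : Claim_equal_normalize_changed_files := by
  intro files _
  show normalize_changed_files files = normalize_changed_files_alt files
  unfold normalize_changed_files normalize_changed_files_alt
  rw [show ((PySem.Set.empty : PySem.Set String), ([] : List String))
        = (([] : List String), ([] : List String)) from rfl]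
  rw [outer_eq, peel_eq_ofList]
  unfold pvFlatten
  rw [filter_flatMap_comm]
  simp only [PySem.Set.ofList_eq_foldl]
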